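-- pv_equiv track=rewrite | github.com/asem-ai/labs_1 | lab1/main.py | common_unique_chars
-- ===== SOURCE A (Python) =====
-- def common_unique_chars(s1, s2):
--     s2_chars = set()
--     for char in s2:
--         s2_chars.add(char)
--     result = ""
--     seen = set()
--
--     for char in s1:
--         if char.isalpha():
--             if char in s2_chars and char not in seen:
--                 result += char
--                 seen.add(char)
--
--     return result
-- ===== SOURCE B (Python) =====
-- def common_unique_chars(s1, s2):
--     if not s1:
--         return ""
--     c = s1[0]
--     rest = s1[1:].replace(c, "")
--     head = c if c.isalpha() and c in s2 else ""
--     return head + common_unique_chars(rest, s2)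
-- ===== Notes on version B (the rewrite author's own statement) =====
-- stated objective: alternative
-- what changed: Replaces A's single iterative pass with a seen-set and per-character string accumulation by a recursive head/rest decomposition that needs no seen-set at all: it decides the head character directly (alphabetic and in s2) and removes every later copy of it from the tail with str.replace before recursing, so uniqueness comes from deletion rather than bookkeeping.
import Mathlib
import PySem

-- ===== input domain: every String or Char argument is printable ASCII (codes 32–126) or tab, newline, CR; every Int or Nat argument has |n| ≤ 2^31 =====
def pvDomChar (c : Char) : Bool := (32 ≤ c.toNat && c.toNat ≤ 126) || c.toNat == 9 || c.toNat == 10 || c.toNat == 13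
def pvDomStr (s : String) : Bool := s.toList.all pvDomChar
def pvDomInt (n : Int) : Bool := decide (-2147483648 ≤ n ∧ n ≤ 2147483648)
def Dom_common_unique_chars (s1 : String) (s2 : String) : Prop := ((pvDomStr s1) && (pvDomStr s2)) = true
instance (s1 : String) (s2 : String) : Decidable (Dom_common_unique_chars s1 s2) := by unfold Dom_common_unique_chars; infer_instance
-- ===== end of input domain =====

-- B replaces A's single iterative pass (seen-set bookkeeping + string accumulation) by a
-- recursive head/rest decomposition with no seen-set: it emits the head if alphabetic and in
-- s2, deletes every later copy of it from the tail, and recurses ('alternative' objective).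

-- ===== PORT A =====
-- one loop iteration of A over s1: state = (result so far, seen set)
def pvStepA (s2c : PySem.Set Char) (st : List Char × PySem.Set Char) (c : Char) :
    List Char × PySem.Set Char :=
  if PySem.Chars.isalpha c then
    if PySem.Set.contains s2c c && !(PySem.Set.contains st.2 c) then
      (st.1 ++ [c], PySem.Set.add st.2 c)
    else st
  else st

def common_unique_chars (s1 : String) (s2 : String) : String :=
  let s2c : PySem.Set Char := s2.toList.foldl PySem.Set.add PySem.Set.empty
  String.ofList ((s1.toList.foldl (pvStepA s2c) ([], PySem.Set.empty)).1)

-- ===== PORT B =====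
-- B's recursion over s1 as a char list: head c, rest = s1[1:].replace(c, "") (= filter ≠ c),
-- head emitted iff alphabetic and in s2 ('c in s2' = membership in s2's chars).
def pvAltGo (l : List Char) (s2l : List Char) : List Char :=
  match l with
  | [] => []
  | c :: tl =>
    (if PySem.Chars.isalpha c && s2l.contains c then [c] else []) ++
      pvAltGo (tl.filter (fun x => x ≠ c)) s2l
termination_by l.length
decreasing_by
  simp only [List.length_unattach, List.length_cons]
  exact Nat.lt_succ_of_le (le_trans (List.length_filter_le _ _) (by simp))

def common_unique_chars_alt (s1 : String) (s2 : String) : String :=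
  String.ofList (pvAltGo s1.toList s2.toList)

-- ===== PRECONDITION & SPEC =====
def Spec_common_unique_chars (s1 : String) (s2 : String) (out : String) : Prop := out = common_unique_chars_alt s1 s2
instance (s1 : String) (s2 : String) (out : String) : Decidable (Spec_common_unique_chars s1 s2 out) := by unfold Spec_common_unique_chars; infer_instance

-- ===== CLAIM (what is proved, stated in full; the proofs are below) =====
def Claim_equal_common_unique_chars : Prop := ∀ (s1 : String) (s2 : String), Dom_common_unique_chars s1 s2 → Spec_common_unique_chars s1 s2 (common_unique_chars s1 s2)

-- ===== LEMMAS AND PROOFS =====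

-- A's loop, started in a state where result and seen hold the same list, computes
-- Set-insertion of the filtered characters on both components.
lemma loopA_eq (s2c : PySem.Set Char) (l : List Char) (r : List Char) :
    l.foldl (pvStepA s2c) (r, r) =
      (((l.filter (fun c => PySem.Chars.isalpha c && PySem.Set.contains s2c c)).foldl
          PySem.Set.add r),
       ((l.filter (fun c => PySem.Chars.isalpha c && PySem.Set.contains s2c c)).foldl
          PySem.Set.add r)) := by
  induction l generalizing r with
  | nil => rfl
  | cons c tl ih =>
    by_cases ha : PySem.Chars.isalpha c <;>
    by_cases hm : c ∈ s2c <;>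
    by_cases hs : c ∈ r <;>
    simp [pvStepA, PySem.Set.add, PySem.Set.contains, ha, hm, hs, ih]

-- folding Set.add over elements all ≠ c commutes with a leading c in the accumulator
lemma foldl_add_cons (c : Char) (l : List Char) (hl : ∀ x ∈ l, x ≠ c) (r : List Char) :
    l.foldl PySem.Set.add (c :: r) = c :: l.foldl PySem.Set.add r := by
  induction l generalizing r with
  | nil => rfl
  | cons x tl ih =>
    have hx : x ≠ c := hl x (by simp)
    have htl : ∀ y ∈ tl, y ≠ c := fun y hy => hl y (by simp [hy])
    simp only [List.foldl_cons]
    rw [show PySem.Set.add (c :: r) x = c :: PySem.Set.add r x by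
      have hxc : (x == c) = false := beq_eq_false_iff_ne.mpr hx
      simp only [PySem.Set.add, PySem.Set.contains, List.contains_cons, hxc, Bool.false_or,
        List.cons_append]
      split <;> rfl]
    exact ih htl _
-- elements already in the accumulator can be dropped before folding Set.add
lemma foldl_add_filter (c : Char) (l : List Char) (r : List Char) (hc : c ∈ r) :
    l.foldl PySem.Set.add r = (l.filter (fun x => x ≠ c)).foldl PySem.Set.add r := by
  induction l generalizing r with
  | nil => rfl
  | cons x tl ih =>
    by_cases hx : x = c
    · subst hx
      simp only [List.filter_cons, decide_not]
      simp [PySem.Set.add, hc, ih r hc]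
    · have : c ∈ PySem.Set.add r x := by
        simp [PySem.Set.add]; split_ifs <;> simp [hc]
      simp [hx, ih _ this]

-- PySem dedup (= dict.fromkeys order) satisfies the head/rest recursion B uses
lemma dedup_cons (c : Char) (l : List Char) :
    PySem.List.dedup (c :: l) = c :: PySem.List.dedup (l.filter (fun x => x ≠ c)) := by
  have h1 : PySem.List.dedup (c :: l) = l.foldl PySem.Set.add [c] := by
    simp [PySem.List.dedup_eq_ofList, PySem.Set.ofList_eq_foldl, PySem.Set.add]
  rw [h1, foldl_add_filter c l [c] (by simp),
    foldl_add_cons c _ (fun x hx => by simpa using (List.mem_filter.mp hx).2) []]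
  simp [PySem.List.dedup_eq_ofList, PySem.Set.ofList_eq_foldl]

-- B's recursion computes dedup of the filtered list (strong induction on the length of l)
lemma altGo_eq_aux (s2l : List Char) (n : Nat) : ∀ l : List Char, l.length ≤ n →
    pvAltGo l s2l =
      PySem.List.dedup (l.filter (fun c => PySem.Chars.isalpha c && s2l.contains c)) := by
  induction n with
  | zero =>
    intro l hl
    have hnil : l = [] := List.eq_nil_of_length_eq_zero (Nat.le_zero.mp hl)
    subst hnil
    rw [pvAltGo]
    rfl
  | succ n ih =>
    intro l hl
    match l with
    | [] =>
      rw [pvAltGo]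
      rfl
    | c :: tl =>
      rw [pvAltGo]
      have hrec := ih (tl.filter (fun x => x ≠ c))
        (le_trans (List.length_filter_le _ _) (Nat.succ_le_succ_iff.mp hl))
      by_cases hp : (PySem.Chars.isalpha c && s2l.contains c) = true
      · rw [if_pos hp, hrec, List.filter_cons, if_pos hp, dedup_cons, List.filter_comm]
        rfl
      · have hfil : (tl.filter (fun x => PySem.Chars.isalpha x && s2l.contains x)).filter
              (fun x => decide (x ≠ c)) =
            tl.filter (fun x => PySem.Chars.isalpha x && s2l.contains x) :=
          List.filter_eq_self.mpr (fun x hx => by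
            have hpx := (List.mem_filter.mp hx).2
            have : x ≠ c := by rintro rfl; exact hp hpx
            simpa using this)
        rw [if_neg hp, hrec, List.filter_cons, if_neg hp, List.filter_comm, hfil,
          List.nil_append]

lemma altGo_eq (s2l : List Char) (l : List Char) :
    pvAltGo l s2l =
      PySem.List.dedup (l.filter (fun c => PySem.Chars.isalpha c && s2l.contains c)) :=
  altGo_eq_aux s2l l.length l le_rfl

theorem common_unique_chars_eq (s1 s2 : String) :
    common_unique_chars s1 s2 = common_unique_chars_alt s1 s2 := by
  simp only [common_unique_chars, common_unique_chars_alt]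
  rw [show (PySem.Set.empty : PySem.Set Char) = ([] : List Char) from rfl, loopA_eq,
    altGo_eq]
  dsimp only
  rw [PySem.List.dedup_eq_ofList, PySem.Set.ofList_eq_foldl]
  congr 2
  apply List.filter_congr
  intro x _
  congr 1
  simp [PySem.Set.contains, ← PySem.Set.ofList_eq_foldl, PySem.Set.mem_ofList]

-- ===== VERDICT (by name: the statement is the Claim_ definition above) =====
theorem common_unique_chars_spec : Claim_equal_common_unique_chars := by
  intro s1 s2 _
  unfold Spec_common_unique_chars
  exact common_unique_chars_eq s1 s2
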